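-- pv_equiv track=rewrite | github.com/Jang-Jaewon/Algorithm-Study | 01_basic/012_호준이의아르바이트.py | solution
-- ===== SOURCE A (Python) =====
-- def solution(array):
--   array.sort(reverse=True)
--   res = 0
--   rank = 1
--   for i in range(len(array)-1):
--     res += 1
--     if array[i] != array[i+1]:
--       rank += 1
--     if rank > 3:
--       return res
-- ===== SOURCE B (Python) =====
-- def solution(array):
--     array.sort(reverse=True)
--     distinct = sorted(set(array), reverse=True)
--     if len(distinct) > 3:
--         cutoff = distinct[2]
--         return sum(1 for x in array if x >= cutoff)
-- ===== Notes on version B (the rewrite author's own statement) =====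
-- stated objective: simpler
-- what changed: A scans adjacent pairs of the sorted array with a running rank counter and an early return; B instead computes the distinct values once (sorted(set(array), reverse=True)), takes the 3rd largest distinct value as a cutoff, and returns the count of elements >= that cutoff (None when fewer than 4 distinct values, as in A).
import Mathlib
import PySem

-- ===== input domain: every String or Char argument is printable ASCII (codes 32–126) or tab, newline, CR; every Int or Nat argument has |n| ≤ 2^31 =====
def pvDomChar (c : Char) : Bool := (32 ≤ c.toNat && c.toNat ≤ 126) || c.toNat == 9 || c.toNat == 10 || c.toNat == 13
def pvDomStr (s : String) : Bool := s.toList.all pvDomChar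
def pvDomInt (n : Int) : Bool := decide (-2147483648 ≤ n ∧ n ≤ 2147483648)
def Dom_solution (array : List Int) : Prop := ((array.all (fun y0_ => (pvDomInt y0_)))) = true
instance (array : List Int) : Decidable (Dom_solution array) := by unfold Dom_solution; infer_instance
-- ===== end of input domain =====

-- B replaces A's rank-counting scan of adjacent pairs with a set/cutoff computation
-- (count elements ≥ the 3rd largest distinct value, if a 4th distinct value exists);
-- objective: simpler. Both A and B sort `array` in place (same mutation); the theorem
-- is about the return value (None when fewer than 4 distinct values, as in A).

-- ===== PORT A =====
-- the 'for i in range(len(array)-1)' loop, walking adjacent pairs with (res, rank) state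
def solutionLoop : List Int → Int → Int → Option Int
  | x :: y :: rest, res, rank =>
    let res' := res + 1
    let rank' := if x ≠ y then rank + 1 else rank
    if rank' > 3 then some res' else solutionLoop (y :: rest) res' rank'
  | _, _, _ => none

def solution (array : List Int) : Option Int :=
  solutionLoop (PySem.List.sorted array (fun x => x) true) 0 1

-- ===== PORT B =====
def solution_alt (array : List Int) : Option Int :=
  let arr := PySem.List.sorted array (fun x => x) true
  let distinct := PySem.List.sorted (PySem.Set.ofList arr) (fun x => x) true
  if distinct.length > 3 then
    let cutoff := PySem.List.pyGetD distinct 2 0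
    some ((arr.countP (fun x => decide (cutoff ≤ x)) : Nat) : Int)  -- sum(1 for x in array if x >= cutoff)
  else
    none

-- ===== PRECONDITION & SPEC =====
def Spec_solution (array : List Int) (out : Option Int) : Prop := out = solution_alt array
instance (array : List Int) (out : Option Int) : Decidable (Spec_solution array out) := by unfold Spec_solution; infer_instance

-- ===== CLAIM (what is proved, stated in full; the proofs are below) =====
def Claim_equal_solution : Prop := ∀ (array : List Int), Dom_solution array → Spec_solution array (solution array)

-- ===== LEMMAS AND PROOFS =====

-- distinct values of a sorted-descending list, read off adjacent comparisons
def dgroups : List Int → List Int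
  | [] => []
  | [x] => [x]
  | x :: y :: rest => if x = y then dgroups (y :: rest) else x :: dgroups (y :: rest)

lemma mem_of_mem_dgroups : ∀ {l : List Int} {z : Int}, z ∈ dgroups l → z ∈ l := by
  intro l
  induction l with
  | nil => intro z h; simp [dgroups] at h
  | cons x t ih =>
    intro z h
    cases t with
    | nil => simpa [dgroups] using h
    | cons y rest =>
      by_cases hxy : x = y
      · rw [show dgroups (x :: y :: rest) = dgroups (y :: rest) from by simp [dgroups, hxy]] at h
        exact List.mem_cons_of_mem _ (ih h)
      · simp only [dgroups, if_neg hxy, List.mem_cons] at h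
        rcases h with h | h
        · exact h ▸ List.mem_cons_self
        · exact List.mem_cons_of_mem _ (ih h)

lemma dgroups_nodup : ∀ {l : List Int}, l.Pairwise (fun a b => b ≤ a) → (dgroups l).Pairwise (· > ·) := by
  intro l
  induction l with
  | nil => intro _; simp [dgroups]
  | cons x t ih =>
    intro hp
    rcases List.pairwise_cons.mp hp with ⟨hx, ht⟩
    cases t with
    | nil => simp [dgroups]
    | cons y rest =>
      by_cases hxy : x = y
      · rw [show dgroups (x :: y :: rest) = dgroups (y :: rest) from by simp [dgroups, hxy]]
        exact ih ht
      · simp only [dgroups, if_neg hxy]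
        refine List.pairwise_cons.mpr ⟨?_, ih ht⟩
        intro z hz
        have hzm := mem_of_mem_dgroups hz
        have hzy : z ≤ y := by
          rcases List.mem_cons.mp hzm with h | h
          · exact h.le
          · exact (List.pairwise_cons.mp ht).1 z h
        have hyx : y ≤ x := hx y List.mem_cons_self
        have : y < x := lt_of_le_of_ne hyx (fun h => hxy h.symm)
        exact lt_of_le_of_lt hzy this

lemma mem_dgroups_iff : ∀ {l : List Int} {z : Int}, z ∈ dgroups l ↔ z ∈ l := by
  intro l
  induction l with
  | nil => intro z; simp [dgroups]
  | cons x t ih =>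
    intro z
    cases t with
    | nil => simp [dgroups]
    | cons y rest =>
      by_cases hxy : x = y
      · subst hxy
        rw [show dgroups (x :: x :: rest) = dgroups (x :: rest) from by simp [dgroups]]
        constructor
        · intro h
          exact List.mem_cons_of_mem _ (ih.mp h)
        · intro h
          rcases List.mem_cons.mp h with h | h
          · exact ih.mpr (h ▸ List.mem_cons_self)
          · exact ih.mpr h
      · simp only [dgroups, if_neg hxy, List.mem_cons, ih]

-- sorted(set(arr), reverse=True) for a sorted-descending arr is exactly dgroups arr
lemma sorted_set_eq_dgroups (arr : List Int) (hp : arr.Pairwise (fun a b => b ≤ a)) :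
    PySem.List.sorted (PySem.Set.ofList arr) (fun x => x) true = dgroups arr := by
  apply PySem.List.sorted_rev_eq_of_perm_of_pairwise_gt
  · apply (List.perm_ext_iff_of_nodup ((dgroups_nodup hp).imp ne_of_gt) (PySem.Set.nodup_ofList arr)).mpr
    intro a
    rw [mem_dgroups_iff, PySem.Set.mem_ofList]
  · exact dgroups_nodup hp

-- the main invariant of A's loop over a sorted-descending list
lemma dgroups_ne_nil : ∀ (x : Int) (t : List Int), dgroups (x :: t) ≠ [] := by
  intro x t
  induction t generalizing x with
  | nil => simp [dgroups]
  | cons y r ih =>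
    by_cases h : x = y
    · rw [show dgroups (x :: y :: r) = dgroups (y :: r) from by simp [dgroups, h]]
      exact ih y
    · simp [dgroups, h]

lemma loop_invariant : ∀ (s : List Int), s.Pairwise (fun a b => b ≤ a) →
    ∀ (k : Nat) (res : Int), 1 ≤ k → k ≤ 3 →
    solutionLoop s res (4 - (k : Int)) =
      if k < (dgroups s).length then
        some (res + ((s.countP (fun x => decide ((dgroups s).getD (k - 1) 0 ≤ x)) : Nat) : Int))
      else none := by
  intro s
  induction s with
  | nil => intro _ k res hk1 _; simp [solutionLoop, dgroups]
  | cons x t ih =>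
    intro hp k res hk1 hk3
    rcases List.pairwise_cons.mp hp with ⟨hx, ht⟩
    cases t with
    | nil =>
      simp only [dgroups, List.length_singleton]
      rw [if_neg (by omega)]
      rfl
    | cons y rest =>
      have hyx : y ≤ x := hx y List.mem_cons_self
      by_cases hxy : x = y
      · -- equal adjacent values: rank unchanged
        subst hxy
        have hg : dgroups (x :: x :: rest) = dgroups (x :: rest) := by simp [dgroups]
        have step : solutionLoop (x :: x :: rest) res (4 - (k : Int)) =
            solutionLoop (x :: rest) (res + 1) (4 - (k : Int)) := by
          simp only [solutionLoop, ne_eq, not_true_eq_false, if_false]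
          rw [if_neg (by omega)]
        rw [step, ih ht k (res + 1) hk1 hk3, hg]
        by_cases hlen : k < (dgroups (x :: rest)).length
        · rw [if_pos hlen, if_pos hlen]
          have hcut : (dgroups (x :: rest)).getD (k - 1) 0 ≤ x := by
            have hkm : k - 1 < (dgroups (x :: rest)).length := by omega
            have hmem : (dgroups (x :: rest)).getD (k - 1) 0 ∈ dgroups (x :: rest) := by
              rw [List.getD_eq_getElem _ _ hkm]; exact List.getElem_mem hkm
            have := mem_dgroups_iff.mp hmem
            rcases List.mem_cons.mp this with h | h
            · exact h.le
            · exact le_trans ((List.pairwise_cons.mp ht).1 _ h) le_rfl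
          have hrw : (x :: x :: rest).countP
              (fun z => decide ((dgroups (x :: rest)).getD (k - 1) 0 ≤ z)) =
              (x :: rest).countP
              (fun z => decide ((dgroups (x :: rest)).getD (k - 1) 0 ≤ z)) + 1 :=
            List.countP_cons_of_pos (by simpa using hcut)
          rw [hrw]
          push_cast
          ring_nf
        · rw [if_neg hlen, if_neg hlen]
      · -- distinct adjacent values: rank increases
        have hylt : y < x := lt_of_le_of_ne hyx (fun h => hxy h.symm)
        have hall : ∀ z ∈ y :: rest, z < x := by
          intro z hz
          rcases List.mem_cons.mp hz with h | h
          · exact h ▸ hylt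
          · exact lt_of_le_of_lt ((List.pairwise_cons.mp ht).1 z h) hylt
        have hgd : dgroups (x :: y :: rest) = x :: dgroups (y :: rest) := by
          simp [dgroups, hxy]
        by_cases hk : k = 1
        · -- rank' = 4 > 3: early return
          subst hk
          have hone : solutionLoop (x :: y :: rest) res (4 - ((1 : Nat) : Int)) = some (res + 1) := by
            simp only [solutionLoop, ne_eq, hxy, not_false_eq_true, if_true]
            norm_num
          rw [hone, hgd]
          have hlen : 1 < (x :: dgroups (y :: rest)).length := by
            have := dgroups_ne_nil y rest
            simp only [List.length_cons]
            have : 0 < (dgroups (y :: rest)).length := List.length_pos_iff.mpr this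
            omega
          rw [if_pos hlen]
          have hcnt : (x :: y :: rest).countP (fun z => decide (x ≤ z)) = 1 := by
            rw [List.countP_cons_of_pos (by simp)]
            have : (y :: rest).countP (fun z => decide (x ≤ z)) = 0 := by
              rw [List.countP_eq_zero]
              intro z hz
              simpa using not_le.mpr (hall z hz)
            omega
          norm_num [hcnt]
        · -- 2 ≤ k: recurse with k - 1
          have hk2 : 2 ≤ k := by omega
          have step : solutionLoop (x :: y :: rest) res (4 - (k : Int)) =
              solutionLoop (y :: rest) (res + 1) (4 - ((k - 1 : Nat) : Int)) := by
            simp only [solutionLoop, ne_eq, hxy, not_false_eq_true, if_true]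
            rw [if_neg (by omega)]
            congr 1
            push_cast [Nat.cast_sub (by omega : 1 ≤ k)]
            ring
          rw [step, ih ht (k - 1) (res + 1) (by omega) (by omega), hgd]
          simp only [List.length_cons]
          by_cases hlen : k - 1 < (dgroups (y :: rest)).length
          · rw [if_pos hlen, if_pos (by omega)]
            have hidx : (x :: dgroups (y :: rest)).getD (k - 1) 0 =
                (dgroups (y :: rest)).getD (k - 1 - 1) 0 := by
              have hkk : k - 1 = (k - 2) + 1 := by omega
              have hkk2 : k - 2 = k - 1 - 1 := by omega
              rw [hkk, hkk2]
              simp only [List.getD_cons_succ]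
              congr 1
            rw [hidx]
            set c := (dgroups (y :: rest)).getD (k - 1 - 1) 0 with hc
            have hcx : c ≤ x := by
              have hkm : k - 1 - 1 < (dgroups (y :: rest)).length := by omega
              have hmem : c ∈ dgroups (y :: rest) := by
                rw [hc, List.getD_eq_getElem _ _ hkm]; exact List.getElem_mem hkm
              exact (hall c (mem_dgroups_iff.mp hmem)).le
            have hrw : (x :: y :: rest).countP (fun z => decide (c ≤ z)) =
                (y :: rest).countP (fun z => decide (c ≤ z)) + 1 :=
              List.countP_cons_of_pos (by simpa using hcx)
            rw [hrw]
            push_cast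
            ring_nf
          · rw [if_neg hlen, if_neg (by omega)]

-- ===== VERDICT (by name: the statement is the Claim_ definition above) =====
theorem solution_spec : Claim_equal_solution := by
  intro array _
  unfold Spec_solution solution solution_alt
  set s := PySem.List.sorted array (fun x => x) true with hs
  have hp : s.Pairwise (fun a b => b ≤ a) := PySem.List.sorted_pairwise_rev array (fun x => x)
  show solutionLoop s 0 1 =
    if (PySem.List.sorted (PySem.Set.ofList s) (fun x => x) true).length > 3 then
      some (((s.countP (fun x =>
        decide (PySem.List.pyGetD (PySem.List.sorted (PySem.Set.ofList s) (fun x => x) true) 2 0 ≤ x)) : Nat) : Int))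
    else none
  rw [sorted_set_eq_dgroups s hp]
  have key := loop_invariant s hp 3 0 (by omega) (by omega)
  norm_num at key
  rw [show (1 : Int) = 4 - ((3 : Nat) : Int) from by norm_num, loop_invariant s hp 3 0 (by omega) (by omega)]
  by_cases h : 3 < (dgroups s).length
  · rw [if_pos h, if_pos h]
    simp only [PySem.List.pyGetD_ofNat']
    norm_num
  · rw [if_neg h, if_neg h]
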